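-- pv_equiv track=rewrite | github.com/theasguard/Asguard-Updates | asgu/asguard_lib/scraper_utils.py | check_sd_url
-- ===== SOURCE A (Python) =====
-- def check_sd_url(release_link):
--
--     try:
--         release_link = release_link.lower()
--         if '4k' in release_link:
--             quality = '4K'
--         elif '1080' in release_link:
--             quality = '1080p'
--         elif '720' in release_link:
--             quality = '720p'
--         elif '.hd.' in release_link:
--             quality = '720p'
--         elif any(i in ['dvdscr', 'r5', 'r6'] for i in release_link):
--             quality = 'SCR'
--         elif any(i in ['camrip', 'tsrip', 'hdcam', 'hdts', 'dvdcam', 'dvdts', 'cam', 'telesync', 'ts'] for i in release_link):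
--             quality = 'CAM'
--         else:
--             quality = 'SD'
--         return quality
--     except:
--         return 'SD'
-- ===== SOURCE B (Python) =====
-- _QUALITY_TABLE = [('4k', '4K'), ('1080', '1080p'), ('720', '720p'), ('.hd.', '720p')]
--
-- def check_sd_url(release_link):
--     try:
--         link = release_link.lower()
--         for token, quality in _QUALITY_TABLE:
--             if token in link:
--                 return quality
--         return 'SD'
--     except:
--         return 'SD'
-- ===== Notes on version B (the rewrite author's own statement) =====
-- stated objective: simpler
-- what changed: Replaces the if/elif chain with a single loop over an ordered (substring, quality) table, dropping the SCR/CAM branches whose any(i in [...] for i in release_link) iterates single characters against multi-character tokens and so can never fire.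
import Mathlib
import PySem

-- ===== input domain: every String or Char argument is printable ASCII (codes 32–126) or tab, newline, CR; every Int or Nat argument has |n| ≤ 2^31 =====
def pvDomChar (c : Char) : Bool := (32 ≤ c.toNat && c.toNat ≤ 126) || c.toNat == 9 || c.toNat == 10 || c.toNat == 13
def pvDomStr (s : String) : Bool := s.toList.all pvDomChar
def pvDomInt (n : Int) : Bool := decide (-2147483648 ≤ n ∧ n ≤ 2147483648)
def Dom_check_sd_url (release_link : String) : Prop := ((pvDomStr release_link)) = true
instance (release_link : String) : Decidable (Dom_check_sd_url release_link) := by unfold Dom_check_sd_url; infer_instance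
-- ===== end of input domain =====

-- B replaces A's if/elif chain by one loop over an ordered (substring, quality) table,
-- dropping A's SCR/CAM branches, which compare single characters against multi-character
-- tokens and so never fire (objective: simpler).

-- ===== PORT A =====
def check_sd_url (release_link : String) : String :=
  let rl := PySem.Str.lower release_link
  if PySem.Str.isIn "4k" rl then "4K"
  else if PySem.Str.isIn "1080" rl then "1080p"
  else if PySem.Str.isIn "720" rl then "720p"
  else if PySem.Str.isIn ".hd." rl then "720p"
  else if rl.toList.any (fun i => ["dvdscr", "r5", "r6"].contains (String.ofList [i])) then "SCR"
  else if rl.toList.any (fun i =>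
      ["camrip", "tsrip", "hdcam", "hdts", "dvdcam", "dvdts", "cam", "telesync", "ts"].contains (String.ofList [i])) then "CAM"
  else "SD"

-- ===== PORT B =====
def qualityTable : List (String × String) :=
  [("4k", "4K"), ("1080", "1080p"), ("720", "720p"), (".hd.", "720p")]

def qualLoop (table : List (String × String)) (link : String) : String :=
  match table with
  | [] => "SD"
  | (token, quality) :: rest =>
      if PySem.Str.isIn token link then quality else qualLoop rest link

def check_sd_url_alt (release_link : String) : String :=
  qualLoop qualityTable (PySem.Str.lower release_link)

-- ===== PRECONDITION & SPEC =====
def Spec_check_sd_url (release_link : String) (out : String) : Prop := out = check_sd_url_alt release_link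
instance (release_link : String) (out : String) : Decidable (Spec_check_sd_url release_link out) := by unfold Spec_check_sd_url; infer_instance

-- ===== CLAIM (what is proved, stated in full; the proofs are below) =====
def Claim_equal_check_sd_url : Prop := ∀ (release_link : String), Dom_check_sd_url release_link → Spec_check_sd_url release_link (check_sd_url release_link)

-- ===== LEMMAS AND PROOFS =====

-- a one-character string never equals a multi-character token, so A's SCR/CAM tests are false
theorem singleton_contains_scr (c : Char) :
    (["dvdscr", "r5", "r6"].contains (String.ofList [c])) = false := by
  simp only [List.contains, List.elem_eq_mem, decide_eq_false_iff_not, List.mem_cons,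
    List.not_mem_nil, or_false]
  rintro (h | h | h) <;>
    · have := congrArg (fun t => t.toList.length) h; simp at this

theorem singleton_contains_cam (c : Char) :
    (["camrip", "tsrip", "hdcam", "hdts", "dvdcam", "dvdts", "cam", "telesync", "ts"].contains
      (String.ofList [c])) = false := by
  simp only [List.contains, List.elem_eq_mem, decide_eq_false_iff_not, List.mem_cons,
    List.not_mem_nil, or_false]
  rintro (h | h | h | h | h | h | h | h | h) <;>
    · have := congrArg (fun t => t.toList.length) h; simp at this

-- ===== VERDICT (by name: the statement is the Claim_ definition above) =====
theorem check_sd_url_spec : Claim_equal_check_sd_url := by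
  intro s _
  unfold Spec_check_sd_url check_sd_url check_sd_url_alt qualityTable qualLoop
  simp only [List.any_eq_true, singleton_contains_scr, singleton_contains_cam]
  split_ifs <;> simp_all [qualLoop]
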